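-- pv_equiv track=rewrite | github.com/Crow314/ITF.GB20602 | Week07/D/main.py | cdp
-- ===== SOURCE A (Python) =====
-- def cdp(text: str, dp: list, left: int, right: int) -> int:
--     if dp[left][right] != -1:  # processed
--         return dp[left][right]
--
--     if left == right:
--         return 1
--
--     length = right - left + 1
--     ans = length
--
--     # Separate
--     for i in range(left, right):
--         ans = min(ans, cdp(text, dp, left, i) + cdp(text, dp, i+1, right))
--
--     # Power
--     for i in range(1, length):
--         if length % i == 0:
--             flg = True
--
--             for j in range(i, length):
--                 if text[left+j] != text[left + j%i]:
--                     flg = False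
--                     break
--
--             if flg:
--                 ans = min(ans, cdp(text, dp, left, left+i-1))
--
--     dp[left][right] = ans
--     return dp[left][right]
-- ===== SOURCE B (Python) =====
-- def cdp(text: str, dp: list, left: int, right: int) -> int:
--     if dp[left][right] != -1:
--         return dp[left][right]
--     if left == right:
--         return 1
--
--     t = [row[:] for row in dp]
--
--     def get(a: int, b: int) -> int:
--         if a == b and t[a][a] == -1:
--             return 1
--         return t[a][b]
--
--     for ln in range(2, right - left + 2):
--         for a in range(left, right - ln + 2):
--             b = a + ln - 1
--             if t[a][b] != -1:
--                 continue
--             ans = ln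
--             for i in range(a, b):
--                 ans = min(ans, get(a, i) + get(i + 1, b))
--             for i in range(1, ln):
--                 if ln % i == 0 and all(text[a + j] == text[a + j % i] for j in range(i, ln)):
--                     ans = min(ans, get(a, a + i - 1))
--             t[a][b] = ans
--
--     return t[left][right]
-- ===== Notes on version B (the rewrite author's own statement) =====
-- stated objective: alternative
-- what changed: Replaces A's top-down recursive memoization (which mutates dp in place) by a bottom-up iterative interval DP that fills a private copy of the table by increasing interval length and never mutates the caller's dp.
-- outside the precondition, e.g. on cdp('ab', [[-1, -1], [-1, -1]], 1, 0): A returns 0, B returns -1; on cdp('aa', [[-1, -1], [-1, -1]], -2, -1): A returns 1, B returns 1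
import Mathlib
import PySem

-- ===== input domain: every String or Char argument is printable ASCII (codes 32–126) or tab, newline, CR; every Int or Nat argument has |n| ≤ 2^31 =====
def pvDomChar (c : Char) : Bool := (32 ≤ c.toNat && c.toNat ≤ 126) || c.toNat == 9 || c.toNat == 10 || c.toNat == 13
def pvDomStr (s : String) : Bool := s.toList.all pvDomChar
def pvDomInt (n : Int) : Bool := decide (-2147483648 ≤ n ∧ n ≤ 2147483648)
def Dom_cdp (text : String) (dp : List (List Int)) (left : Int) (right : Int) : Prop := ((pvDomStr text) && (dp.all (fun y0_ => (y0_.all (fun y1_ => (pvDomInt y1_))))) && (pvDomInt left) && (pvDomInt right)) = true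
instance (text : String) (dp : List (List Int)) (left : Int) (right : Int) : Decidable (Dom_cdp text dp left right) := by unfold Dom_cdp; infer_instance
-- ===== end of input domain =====

-- B replaces A's recursive memoization by a bottom-up interval DP over a private copy of the
-- table (objective: alternative decomposition, same asymptotic cost). A mutates dp in place,
-- B does not; the equivalence proved here is about the RETURN VALUE only.

-- ===== PORT A =====
-- shared low-level cell access (dp[a][b] read / write, text[i] read), used by both ports
def mget (d : List (List Int)) (a b : Int) : Int :=
  ((PySem.List.pyGet? d a).bind (fun row => PySem.List.pyGet? row b)).getD 0

def mset (d : List (List Int)) (a b : Int) (v : Int) : List (List Int) :=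
  d.set a.toNat ((d.getD a.toNat []).set b.toNat v)

def tget (text : List Char) (i : Int) : Char :=
  (PySem.List.pyGet? text i).getD 'a'

-- the inner j-loop of A's Power phase (pure; early break = returning false)
def powChk (text : List Char) (left i len j : Int) : Bool :=
  if j < len then
    if tget text (left + j) ≠ tget text (left + PySem.Int.mod j i) then false
    else powChk text left i len (j + 1)
  else true
termination_by (len - j).toNat
decreasing_by simp_wf; omega

-- A's recursion, with the mutated dp threaded as explicit state.
-- The Nat `fuel` argument only makes the recursion structural (Python recurses on smaller
-- intervals and terminates); cdp below passes fuel sufficient for every call (proved in the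
-- lemmas), so the fuel-0 branches are never reached.
mutual
def cdpGo : Nat → List Char → List (List Int) → Int → Int → Int × List (List Int)
  | 0, _, dp, _, _ => (0, dp)
  | fuel + 1, text, dp, left, right =>
    if mget dp left right ≠ -1 then (mget dp left right, dp)
    else if left = right then (1, dp)
    else
      let p := sepLoop fuel text dp left right left (right - left + 1)
      let q := powLoop fuel text p.2 left right 1 p.1
      let d3 := mset q.2 left right q.1
      (mget d3 left right, d3)

def sepLoop : Nat → List Char → List (List Int) → Int → Int → Int → Int → Int × List (List Int)
  | 0, _, dp, _, _, _, ans => (ans, dp)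
  | fuel + 1, text, dp, left, right, i, ans =>
    if i < right then
      let r1 := cdpGo fuel text dp left i
      let r2 := cdpGo fuel text r1.2 (i + 1) right
      sepLoop fuel text r2.2 left right (i + 1) (min ans (r1.1 + r2.1))
    else (ans, dp)

def powLoop : Nat → List Char → List (List Int) → Int → Int → Int → Int → Int × List (List Int)
  | 0, _, dp, _, _, _, ans => (ans, dp)
  | fuel + 1, text, dp, left, right, i, ans =>
    if i < right - left + 1 then
      if PySem.Int.mod (right - left + 1) i = 0 then
        if powChk text left i (right - left + 1) i then
          let r := cdpGo fuel text dp left (left + i - 1)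
          powLoop fuel text r.2 left right (i + 1) (min ans r.1)
        else powLoop fuel text dp left right (i + 1) ans
      else powLoop fuel text dp left right (i + 1) ans
    else (ans, dp)
end

def cdp (text : String) (dp : List (List Int)) (left : Int) (right : Int) : Int :=
  (cdpGo (((right - left).toNat + 1) * ((right - left).toNat + 1)) text.toList dp left right).1

-- ===== PORT B =====
-- B's power test (the Python `all(...)` generator)
def bPow (text : List Char) (a i ln : Int) : Bool :=
  (PySem.List.pyRange i ln 1).all
    (fun j => tget text (a + j) == tget text (a + PySem.Int.mod j i))

-- B's `get`: a table cell, with unfilled diagonal cells reading as 1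
def bLook (t : List (List Int)) (a b : Int) : Int :=
  if a = b ∧ mget t a a = -1 then 1 else mget t a b

-- the body of B's row loop: fill cell (a, b) of length ln unless already present
def bCell (text : List Char) (t : List (List Int)) (a b ln : Int) : List (List Int) :=
  if mget t a b ≠ -1 then t
  else
    let ans1 := (PySem.List.pyRange a b 1).foldl
      (fun acc i => min acc (bLook t a i + bLook t (i + 1) b)) ln
    let ans2 := (PySem.List.pyRange 1 ln 1).foldl
      (fun acc i =>
        if PySem.Int.mod ln i == 0 && bPow text a i ln then min acc (bLook t a (a + i - 1))
        else acc) ans1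
    mset t a b ans2

def cdp_alt (text : String) (dp : List (List Int)) (left : Int) (right : Int) : Int :=
  if mget dp left right ≠ -1 then mget dp left right
  else if left = right then 1
  else
    let t := (PySem.List.pyRange 2 (right - left + 2) 1).foldl
      (fun t ln => (PySem.List.pyRange left (right - ln + 2) 1).foldl
        (fun t a => bCell text.toList t a (a + ln - 1) ln) t) dp
    mget t left right

-- ===== PRECONDITION & SPEC =====
-- Pre_ admits every memoized hit (dp[left][right] exists — Python index semantics, negative
-- wraparound included — and is ≠ -1, where both programs return it at once), every
-- single-position interval left = right whose cell exists, and otherwise the natural call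
-- shape 0 ≤ left ≤ right with text and every dp row long enough; it excludes inputs where A
-- raises IndexError, together with unmemoized reversed or negative-index intervals of
-- length ≥ 2, where A's empty-loop / wraparound results are accidental.
def Pre_cdp (text : String) (dp : List (List Int)) (left : Int) (right : Int) : Prop :=
  (((PySem.List.pyGet? dp left).bind (fun row => PySem.List.pyGet? row right)).isSome = true ∧
    ((PySem.List.pyGet? dp left).bind (fun row => PySem.List.pyGet? row right)).getD 0 ≠ -1) ∨
  (left = right ∧
    ((PySem.List.pyGet? dp left).bind (fun row => PySem.List.pyGet? row right)).isSome = true) ∨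
  (0 ≤ left ∧ left ≤ right ∧ right.toNat < text.toList.length ∧
    right.toNat < dp.length ∧ ∀ row ∈ dp, right.toNat < row.length)
instance (text : String) (dp : List (List Int)) (left : Int) (right : Int) :
    Decidable (Pre_cdp text dp left right) := by unfold Pre_cdp; infer_instance

def pvWitness_cdp : String × List (List Int) × Int × Int :=
  ("aab", [[-1, -1, -1], [-1, -1, -1], [-1, -1, -1]], 0, 2)

def Spec_cdp (text : String) (dp : List (List Int)) (left : Int) (right : Int) (out : Int) : Prop := out = cdp_alt text dp left right
instance (text : String) (dp : List (List Int)) (left : Int) (right : Int) (out : Int) : Decidable (Spec_cdp text dp left right out) := by unfold Spec_cdp; infer_instance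

-- ===== CLAIM (what is proved, stated in full; the proofs are below) =====
def Claim_equal_cdp : Prop := ∀ (text : String) (dp : List (List Int)) (left : Int) (right : Int), Dom_cdp text dp left right → Pre_cdp text dp left right → Spec_cdp text dp left right (cdp text dp left right)

-- ===== LEMMAS AND PROOFS =====

-- the common value: the pure recursive "compressed length" determined by the ORIGINAL table
mutual
def vGo (text : List Char) (d0 : List (List Int)) (a b : Int) : Int :=
  if mget d0 a b ≠ -1 then mget d0 a b
  else if a = b then 1
  else vPow text d0 a b 1 (vSep text d0 a b a (b - a + 1))
termination_by (2 * (b - a).toNat + 1, 0)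
decreasing_by
  all_goals (simp_wf; apply Prod.Lex.left; omega)

def vSep (text : List Char) (d0 : List (List Int)) (a b i ans : Int) : Int :=
  if a ≤ i ∧ i < b then
    vSep text d0 a b (i + 1) (min ans (vGo text d0 a i + vGo text d0 (i + 1) b))
  else ans
termination_by (2 * (b - a).toNat, (b - i).toNat)
decreasing_by
  all_goals first
    | (apply Prod.Lex.left; omega)
    | (apply Prod.Lex.right; omega)

def vPow (text : List Char) (d0 : List (List Int)) (a b i ans : Int) : Int :=
  if 1 ≤ i ∧ i < b - a + 1 then
    if PySem.Int.mod (b - a + 1) i = 0 then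
      if powChk text a i (b - a + 1) i then
        vPow text d0 a b (i + 1) (min ans (vGo text d0 a (a + i - 1)))
      else vPow text d0 a b (i + 1) ans
    else vPow text d0 a b (i + 1) ans
  else ans
termination_by (2 * (b - a).toNat, (b - a + 1 - i).toNat)
decreasing_by
  all_goals (simp_wf; first
    | (apply Prod.Lex.left; omega)
    | (apply Prod.Lex.right; omega))
end

-- cell-access lemmas
lemma mget_eq (d : List (List Int)) (a b : Int) (ha : 0 ≤ a) (hb : 0 ≤ b) :
    mget d a b = ((d[a.toNat]?.getD [])[b.toNat]?).getD 0 := by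
  unfold mget
  simp only [PySem.List.pyGet?_of_nonneg _ ha, PySem.List.pyGet?_of_nonneg _ hb]
  cases h : d[a.toNat]? with
  | none => simp
  | some row => simp

-- Shape: same outline (row count and row lengths) as the original table
def Shape (d0 d : List (List Int)) : Prop :=
  d.length = d0.length ∧ ∀ k : Nat, (d[k]?.getD []).length = (d0[k]?.getD []).length

-- Rect: all cells with both indices ≤ m exist
def Rect (d0 : List (List Int)) (m : Nat) : Prop :=
  m < d0.length ∧ ∀ row ∈ d0, m < row.length

lemma shape_refl (d0 : List (List Int)) : Shape d0 d0 := ⟨rfl, fun _ => rfl⟩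

lemma shape_mset (d0 d : List (List Int)) (a b v : Int) (h : Shape d0 d) :
    Shape d0 (mset d a b v) := by
  obtain ⟨h1, h2⟩ := h
  simp only [mset, List.getD_eq_getElem?_getD]
  refine ⟨by simpa using h1, fun k => ?_⟩
  by_cases hk : k = a.toNat
  · subst hk
    by_cases hlt : a.toNat < d.length
    · rw [List.getElem?_set_self (by simpa using hlt)]
      simpa using h2 a.toNat
    · rw [List.set_eq_of_length_le (by omega)]
      exact h2 _
  · rw [List.getElem?_set_ne (by omega)]
    exact h2 k

lemma mget_mset_self (d : List (List Int)) (a b v : Int) (ha : 0 ≤ a) (hb : 0 ≤ b)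
    (h1 : a.toNat < d.length) (h2 : b.toNat < (d[a.toNat]?.getD []).length) :
    mget (mset d a b v) a b = v := by
  rw [mget_eq _ _ _ ha hb]
  simp only [mset, List.getD_eq_getElem?_getD]
  rw [List.getElem?_set_self h1]
  simp [List.getElem?_set_self h2]

lemma mget_mset_ne (d : List (List Int)) (a b v x y : Int) (ha : 0 ≤ a) (hb : 0 ≤ b)
    (hx : 0 ≤ x) (hy : 0 ≤ y) (hne : x ≠ a ∨ y ≠ b) :
    mget (mset d a b v) x y = mget d x y := by
  rw [mget_eq _ _ _ hx hy, mget_eq _ _ _ hx hy]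
  simp only [mset, List.getD_eq_getElem?_getD]
  by_cases hxa : x.toNat = a.toNat
  · have hxa' : x = a := by omega
    rcases hne with h | h
    · exact absurd hxa' h
    · have hyb : y.toNat ≠ b.toNat := by omega
      by_cases hlt : a.toNat < d.length
      · rw [hxa', List.getElem?_set_self (by simpa using hlt)]
        simp only [Option.getD_some]
        rw [List.getElem?_set_ne (by omega)]
      · rw [List.set_eq_of_length_le (by omega)]
  · rw [List.getElem?_set_ne (by omega)]

-- Cells: every cell of the evolving table is either its original value or the final value
def Cells (text : List Char) (d0 d : List (List Int)) : Prop :=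
  ∀ a b : Int, 0 ≤ a → 0 ≤ b →
    mget d a b = mget d0 a b ∨ (mget d0 a b = -1 ∧ mget d a b = vGo text d0 a b)

lemma cells_refl (text : List Char) (d0 : List (List Int)) : Cells text d0 d0 :=
  fun _ _ _ _ => Or.inl rfl

-- A's memo short-circuit returns the pure value
lemma cdpGo_base_ne (text : List Char) (d0 d : List (List Int)) (a b : Int)
    (ha : 0 ≤ a) (hb : 0 ≤ b) (hC : Cells text d0 d) (hg : mget d a b ≠ -1) :
    mget d a b = vGo text d0 a b := by
  rcases hC a b ha hb with h | ⟨h1, h2⟩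
  · rw [vGo, if_pos (by rw [← h]; exact hg)]
    exact h
  · exact h2

lemma cells_d0_neg (text : List Char) (d0 d : List (List Int)) (a b : Int)
    (ha : 0 ≤ a) (hb : 0 ≤ b) (hC : Cells text d0 d) (hg : mget d a b = -1) :
    mget d0 a b = -1 := by
  rcases hC a b ha hb with h | ⟨h1, _⟩
  · rw [← h]; exact hg
  · exact h1

lemma sepLoop_eq (text : List Char) (d0 : List (List Int)) (N : Nat) (a b : Int)
    (ha : 0 ≤ a) (hbN : b.toNat ≤ N)
    (IH : ∀ (fuel : Nat) (a' b' : Int) d, (b' - a').toNat < (b - a).toNat →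
      ((b' - a').toNat + 1) * ((b' - a').toNat + 1) ≤ fuel → 0 ≤ a' → a' ≤ b' → b'.toNat ≤ N →
      Shape d0 d → Cells text d0 d →
      (cdpGo fuel text d a' b').1 = vGo text d0 a' b' ∧ Shape d0 (cdpGo fuel text d a' b').2 ∧
        Cells text d0 (cdpGo fuel text d a' b').2) :
    ∀ (fuel : Nat) (i ans : Int) d,
      (b - a).toNat * (b - a).toNat + (b - i).toNat ≤ fuel → a ≤ i →
      Shape d0 d → Cells text d0 d →
      (sepLoop fuel text d a b i ans).1 = vSep text d0 a b i ans ∧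
        Shape d0 (sepLoop fuel text d a b i ans).2 ∧
        Cells text d0 (sepLoop fuel text d a b i ans).2 := by
  intro fuel
  induction fuel with
  | zero =>
    intro i ans d hk hai hS hC
    rw [sepLoop, vSep, if_neg (by omega)]
    exact ⟨rfl, hS, hC⟩
  | succ fuel ihk =>
    intro i ans d hk hai hS hC
    rw [sepLoop, vSep]
    by_cases hg : i < b
    · have hgv : a ≤ i ∧ i < b := ⟨hai, hg⟩
      rw [if_pos hg, if_pos hgv]
      dsimp only
      have hm1 : ((i - a).toNat + 1) * ((i - a).toNat + 1) ≤ (b - a).toNat * (b - a).toNat :=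
        Nat.mul_le_mul (by omega) (by omega)
      have hm2 : ((b - (i + 1)).toNat + 1) * ((b - (i + 1)).toNat + 1)
          ≤ (b - a).toNat * (b - a).toNat :=
        Nat.mul_le_mul (by omega) (by omega)
      obtain ⟨e1, s1, c1⟩ := IH fuel a i d (by omega) (by omega) ha (by omega) (by omega) hS hC
      obtain ⟨e2, s2, c2⟩ := IH fuel (i + 1) b (cdpGo fuel text d a i).2 (by omega) (by omega)
        (by omega) (by omega) hbN s1 c1
      rw [e1, e2]
      exact ihk (i + 1) (min ans (vGo text d0 a i + vGo text d0 (i + 1) b))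
        (cdpGo fuel text (cdpGo fuel text d a i).2 (i + 1) b).2 (by omega) (by omega) s2 c2
    · rw [if_neg hg, if_neg (by omega)]
      exact ⟨rfl, hS, hC⟩

lemma powLoop_eq (text : List Char) (d0 : List (List Int)) (N : Nat) (a b : Int)
    (ha : 0 ≤ a) (hbN : b.toNat ≤ N)
    (IH : ∀ (fuel : Nat) (a' b' : Int) d, (b' - a').toNat < (b - a).toNat →
      ((b' - a').toNat + 1) * ((b' - a').toNat + 1) ≤ fuel → 0 ≤ a' → a' ≤ b' → b'.toNat ≤ N →
      Shape d0 d → Cells text d0 d →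
      (cdpGo fuel text d a' b').1 = vGo text d0 a' b' ∧ Shape d0 (cdpGo fuel text d a' b').2 ∧
        Cells text d0 (cdpGo fuel text d a' b').2) :
    ∀ (fuel : Nat) (i ans : Int) d,
      (b - a).toNat * (b - a).toNat + (b - a + 1 - i).toNat ≤ fuel → 1 ≤ i →
      Shape d0 d → Cells text d0 d →
      (powLoop fuel text d a b i ans).1 = vPow text d0 a b i ans ∧
        Shape d0 (powLoop fuel text d a b i ans).2 ∧
        Cells text d0 (powLoop fuel text d a b i ans).2 := by
  intro fuel
  induction fuel with
  | zero =>
    intro i ans d hk h1i hS hC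
    rw [powLoop, vPow, if_neg (by omega)]
    exact ⟨rfl, hS, hC⟩
  | succ fuel ihk =>
    intro i ans d hk h1i hS hC
    rw [powLoop, vPow]
    by_cases hg : i < b - a + 1
    · have hgv : 1 ≤ i ∧ i < b - a + 1 := ⟨h1i, hg⟩
      rw [if_pos hg, if_pos hgv]
      have hm1 : ((a + i - 1 - a).toNat + 1) * ((a + i - 1 - a).toNat + 1)
          ≤ (b - a).toNat * (b - a).toNat :=
        Nat.mul_le_mul (by omega) (by omega)
      by_cases hm : PySem.Int.mod (b - a + 1) i = 0
      · rw [if_pos hm, if_pos hm]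
        by_cases hp : powChk text a i (b - a + 1) i
        · rw [if_pos hp, if_pos hp]
          dsimp only
          obtain ⟨e1, s1, c1⟩ := IH fuel a (a + i - 1) d (by omega) (by omega) ha (by omega)
            (by omega) hS hC
          rw [e1]
          exact ihk (i + 1) (min ans (vGo text d0 a (a + i - 1)))
            (cdpGo fuel text d a (a + i - 1)).2 (by omega) (by omega) s1 c1
        · rw [if_neg hp, if_neg hp]
          exact ihk (i + 1) ans d (by omega) (by omega) hS hC
      · rw [if_neg hm, if_neg hm]
        exact ihk (i + 1) ans d (by omega) (by omega) hS hC
    · rw [if_neg hg, if_neg (by omega)]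
      exact ⟨rfl, hS, hC⟩

lemma cdpGo_eq (text : List Char) (d0 : List (List Int)) (N : Nat) (hR : Rect d0 N) :
    ∀ n (a b : Int) (fuel : Nat) (d : List (List Int)), (b - a).toNat ≤ n →
      ((b - a).toNat + 1) * ((b - a).toNat + 1) ≤ fuel →
      0 ≤ a → a ≤ b → b.toNat ≤ N → Shape d0 d → Cells text d0 d →
      (cdpGo fuel text d a b).1 = vGo text d0 a b ∧ Shape d0 (cdpGo fuel text d a b).2 ∧
        Cells text d0 (cdpGo fuel text d a b).2 := by
  intro n
  induction n with
  | zero =>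
    intro a b fuel d hn hfuel ha hab hbN hS hC
    have hab' : a = b := by omega
    have hpos : 1 ≤ ((b - a).toNat + 1) * ((b - a).toNat + 1) := Nat.mul_pos (by omega) (by omega)
    obtain ⟨fuel, rfl⟩ : ∃ f, fuel = f + 1 := ⟨fuel - 1, by omega⟩
    rw [cdpGo]
    by_cases hg : mget d a b ≠ -1
    · rw [if_pos hg]
      exact ⟨cdpGo_base_ne text d0 d a b ha (by omega) hC hg, hS, hC⟩
    · rw [if_neg hg, if_pos hab']
      refine ⟨?_, hS, hC⟩
      rw [vGo, if_neg ?_, if_pos hab']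
      rw [cells_d0_neg text d0 d a b ha (by omega) hC (by omega)]
      simp
  | succ n ihn =>
    intro a b fuel d hn hfuel ha hab hbN hS hC
    have hpos : 1 ≤ ((b - a).toNat + 1) * ((b - a).toNat + 1) := Nat.mul_pos (by omega) (by omega)
    obtain ⟨fuel, rfl⟩ : ∃ f, fuel = f + 1 := ⟨fuel - 1, by omega⟩
    rw [cdpGo]
    by_cases hg : mget d a b ≠ -1
    · rw [if_pos hg]
      exact ⟨cdpGo_base_ne text d0 d a b ha (by omega) hC hg, hS, hC⟩
    · rw [if_neg hg]
      have hd0 : mget d0 a b = -1 := cells_d0_neg text d0 d a b ha (by omega) hC (by omega)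
      by_cases hab' : a = b
      · rw [if_pos hab']
        refine ⟨?_, hS, hC⟩
        rw [vGo, if_neg (by rw [hd0]; simp), if_pos hab']
      · rw [if_neg hab']
        dsimp only
        have IH : ∀ (fuel : Nat) (a' b' : Int) d, (b' - a').toNat < (b - a).toNat →
            ((b' - a').toNat + 1) * ((b' - a').toNat + 1) ≤ fuel → 0 ≤ a' → a' ≤ b' →
            b'.toNat ≤ N → Shape d0 d → Cells text d0 d →
            (cdpGo fuel text d a' b').1 = vGo text d0 a' b' ∧
              Shape d0 (cdpGo fuel text d a' b').2 ∧ Cells text d0 (cdpGo fuel text d a' b').2 :=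
          fun fuel a' b' d h hf ha' hab' hbN' => ihn a' b' fuel d (by omega) hf ha' hab' hbN'
        have hsq : ((b - a).toNat + 1) * ((b - a).toNat + 1)
            = (b - a).toNat * (b - a).toNat + 2 * (b - a).toNat + 1 := by ring
        obtain ⟨e1, s1, c1⟩ := sepLoop_eq text d0 N a b ha hbN IH fuel a
          (b - a + 1) d (by omega) (by omega) hS hC
        obtain ⟨e2, s2, c2⟩ := powLoop_eq text d0 N a b ha hbN IH fuel 1
          (sepLoop fuel text d a b a (b - a + 1)).1 (sepLoop fuel text d a b a (b - a + 1)).2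
          (by omega) (by omega) s1 c1
        set q := powLoop fuel text (sepLoop fuel text d a b a (b - a + 1)).2 a b 1
          (sepLoop fuel text d a b a (b - a + 1)).1 with hqdef
        rw [e1] at e2
        have hvgo : vGo text d0 a b = q.1 := by
          rw [vGo, if_neg (by rw [hd0]; simp), if_neg hab', e2]
        have hN : N < d0.length := hR.1
        have hrow : b.toNat < ((q.2)[a.toNat]?.getD []).length := by
          obtain ⟨sl, sr⟩ := s2
          rw [sr a.toNat]
          have hlen : a.toNat < d0.length := by omega
          rw [List.getElem?_eq_getElem hlen]
          exact Nat.lt_of_le_of_lt hbN (hR.2 _ (List.getElem_mem hlen))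
        have hlen2 : a.toNat < q.2.length := by
          have sl := s2.1
          omega
        have hget : mget (mset q.2 a b q.1) a b = q.1 :=
          mget_mset_self q.2 a b q.1 ha (by omega) hlen2 hrow
        refine ⟨by rw [hget, hvgo], shape_mset d0 q.2 a b q.1 s2, ?_⟩
        intro x y hx hy
        by_cases hxy : x = a ∧ y = b
        · obtain ⟨hx1, hy1⟩ := hxy
          subst hx1; subst hy1
          right
          rw [hget, hvgo]
          exact ⟨hd0, rfl⟩
        · rw [mget_mset_ne q.2 a b q.1 x y ha (by omega) hx hy (by tauto)]
          exact c2 x y hx hy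

-- B's power test equals A's inner j-loop
lemma bPow_eq_powChk (text : List Char) (a i ln : Int) : bPow text a i ln = powChk text a i ln i := by
  unfold bPow
  suffices h : ∀ k (j : Int), (ln - j).toNat ≤ k →
      (PySem.List.pyRange j ln 1).all
        (fun j => tget text (a + j) == tget text (a + PySem.Int.mod j i)) = powChk text a i ln j by
    exact h (ln - i).toNat i (by omega)
  intro k
  induction k with
  | zero =>
    intro j hk
    rw [PySem.List.pyRange_one_eq_nil (by omega), powChk, if_neg (by omega)]
    rfl
  | succ k ihk =>
    intro j hk
    by_cases hj : j < ln
    · rw [PySem.List.pyRange_one_cons hj, powChk, if_pos hj]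
      by_cases he : tget text (a + j) = tget text (a + PySem.Int.mod j i)
      · rw [if_neg (by simp [he])]
        simp only [List.all_cons, he, BEq.rfl, Bool.true_and]
        exact ihk (j + 1) (by omega)
      · rw [if_pos (by simpa using he)]
        simp [he]
    · rw [PySem.List.pyRange_one_eq_nil (by omega), powChk, if_neg hj]
      rfl

-- the invariant of B's bottom-up sweep: exactly the cells P marks as processed hold the
-- pure value, every other cell is untouched
def TInv (text : List Char) (d0 : List (List Int)) (left right : Int)
    (P : Int → Int → Prop) (t : List (List Int)) : Prop :=
  Shape d0 t ∧ ∀ x y : Int, 0 ≤ x → 0 ≤ y →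
    ((mget d0 x y = -1 ∧ left ≤ x ∧ x < y ∧ y ≤ right ∧ P x y) →
        mget t x y = vGo text d0 x y) ∧
    (¬ (mget d0 x y = -1 ∧ left ≤ x ∧ x < y ∧ y ≤ right ∧ P x y) →
        mget t x y = mget d0 x y)

lemma TInv_congr (text : List Char) (d0 : List (List Int)) (left right : Int)
    (P Q : Int → Int → Prop) (t : List (List Int)) (h : TInv text d0 left right P t)
    (hiff : ∀ x y, mget d0 x y = -1 → left ≤ x → x < y → y ≤ right → (P x y ↔ Q x y)) :
    TInv text d0 left right Q t := by
  refine ⟨h.1, fun x y hx hy => ⟨fun hc => ?_, fun hc => ?_⟩⟩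
  · exact (h.2 x y hx hy).1
      ⟨hc.1, hc.2.1, hc.2.2.1, hc.2.2.2.1,
        (hiff x y hc.1 hc.2.1 hc.2.2.1 hc.2.2.2.1).2 hc.2.2.2.2⟩
  · refine (h.2 x y hx hy).2 (fun hp => hc ?_)
    exact ⟨hp.1, hp.2.1, hp.2.2.1, hp.2.2.2.1,
      (hiff x y hp.1 hp.2.1 hp.2.2.1 hp.2.2.2.1).1 hp.2.2.2.2⟩

lemma bLook_eq (text : List Char) (d0 : List (List Int)) (left right : Int)
    (P : Int → Int → Prop) (t : List (List Int)) (h : TInv text d0 left right P t)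
    (x y : Int) (hx : 0 ≤ x) (hxy : x ≤ y)
    (hc : x = y ∨ (left ≤ x ∧ y ≤ right ∧ P x y)) :
    bLook t x y = vGo text d0 x y := by
  unfold bLook
  rcases eq_or_lt_of_le hxy with he | hlt
  · subst he
    have hd : mget t x x = mget d0 x x := (h.2 x x hx hx).2 (by omega)
    by_cases m0 : mget d0 x x = -1
    · rw [if_pos ⟨rfl, by rw [hd]; exact m0⟩, vGo, if_neg (by rw [m0]; simp), if_pos rfl]
    · rw [if_neg (by rw [hd]; tauto), hd, vGo, if_pos m0]
  · rcases hc with he | ⟨h1, h2, h3⟩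
    · omega
    · rw [if_neg (by omega)]
      by_cases m0 : mget d0 x y = -1
      · exact (h.2 x y hx (by omega)).1 ⟨m0, h1, hlt, h2, h3⟩
      · rw [(h.2 x y hx (by omega)).2 (by tauto), vGo, if_pos m0]

-- the split-scan fold of B computes vSep
lemma bSep_fold (text : List Char) (d0 : List (List Int)) (left right : Int)
    (P : Int → Int → Prop) (t : List (List Int)) (h : TInv text d0 left right P t)
    (a b : Int) (ha : 0 ≤ a) (hla : left ≤ a) (hbr : b ≤ right)
    (hP : ∀ x y, left ≤ x → x < y → y ≤ right → y - x + 1 ≤ b - a → P x y) :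
    ∀ k (i acc : Int), (b - i).toNat ≤ k → a ≤ i →
      (PySem.List.pyRange i b 1).foldl
        (fun acc i => min acc (bLook t a i + bLook t (i + 1) b)) acc
        = vSep text d0 a b i acc := by
  intro k
  induction k with
  | zero =>
    intro i acc hk hai
    rw [PySem.List.pyRange_one_eq_nil (by omega), vSep, if_neg (by omega)]
    rfl
  | succ k ihk =>
    intro i acc hk hai
    by_cases hib : i < b
    · rw [PySem.List.pyRange_one_cons hib, List.foldl_cons]
      have e1 : bLook t a i = vGo text d0 a i := by
        apply bLook_eq text d0 left right P t h a i ha hai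
        rcases eq_or_lt_of_le hai with he | hlt
        · exact Or.inl he
        · exact Or.inr ⟨hla, by omega, hP a i hla hlt (by omega) (by omega)⟩
      have e2 : bLook t (i + 1) b = vGo text d0 (i + 1) b := by
        apply bLook_eq text d0 left right P t h (i + 1) b (by omega) (by omega)
        rcases eq_or_lt_of_le (show i + 1 ≤ b by omega) with he | hlt
        · exact Or.inl he
        · exact Or.inr ⟨by omega, hbr, hP (i + 1) b (by omega) hlt hbr (by omega)⟩
      rw [e1, e2, vSep, if_pos ⟨hai, hib⟩]
      exact ihk (i + 1) (min acc (vGo text d0 a i + vGo text d0 (i + 1) b)) (by omega) (by omega)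
    · rw [PySem.List.pyRange_one_eq_nil (by omega), vSep, if_neg (by omega)]
      rfl

-- the power-scan fold of B computes vPow
lemma bPow_fold (text : List Char) (d0 : List (List Int)) (left right : Int)
    (P : Int → Int → Prop) (t : List (List Int)) (h : TInv text d0 left right P t)
    (a b ln : Int) (ha : 0 ≤ a) (hla : left ≤ a) (hbr : b ≤ right) (hln : ln = b - a + 1)
    (hP : ∀ x y, left ≤ x → x < y → y ≤ right → y - x + 1 ≤ b - a → P x y) :
    ∀ k (i acc : Int), (ln - i).toNat ≤ k → 1 ≤ i →
      (PySem.List.pyRange i ln 1).foldl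
        (fun acc i => if PySem.Int.mod ln i == 0 && bPow text a i ln
          then min acc (bLook t a (a + i - 1)) else acc) acc
        = vPow text d0 a b i acc := by
  intro k
  induction k with
  | zero =>
    intro i acc hk h1i
    rw [PySem.List.pyRange_one_eq_nil (by omega), vPow, if_neg (by omega)]
    rfl
  | succ k ihk =>
    intro i acc hk h1i
    by_cases hiln : i < ln
    · rw [PySem.List.pyRange_one_cons hiln, List.foldl_cons]
      have hout : (1 ≤ i ∧ i < b - a + 1) := ⟨h1i, by omega⟩
      by_cases hm : PySem.Int.mod (b - a + 1) i = 0
      · by_cases hp : powChk text a i (b - a + 1) i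
        · have hcond : (PySem.Int.mod ln i == 0 && bPow text a i ln) = true := by
            rw [bPow_eq_powChk, hln]
            simp [hm, hp]
          rw [if_pos hcond]
          have e1 : bLook t a (a + i - 1) = vGo text d0 a (a + i - 1) := by
            apply bLook_eq text d0 left right P t h a (a + i - 1) ha (by omega)
            rcases eq_or_lt_of_le (show a ≤ a + i - 1 by omega) with he | hlt
            · exact Or.inl he
            · exact Or.inr ⟨hla, by omega, hP a (a + i - 1) hla hlt (by omega) (by omega)⟩
          rw [e1, vPow, if_pos hout, if_pos hm, if_pos hp]
          exact ihk (i + 1) (min acc (vGo text d0 a (a + i - 1))) (by omega) (by omega)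
        · have hcond : (PySem.Int.mod ln i == 0 && bPow text a i ln) = false := by
            rw [bPow_eq_powChk, hln]
            simp [hm, hp]
          rw [if_neg (by simp [hcond]), vPow, if_pos hout, if_pos hm, if_neg hp]
          exact ihk (i + 1) acc (by omega) (by omega)
      · have hcond : (PySem.Int.mod ln i == 0 && bPow text a i ln) = false := by
          rw [hln]
          simp [hm]
        rw [if_neg (by simp [hcond]), vPow, if_pos hout, if_neg hm]
        exact ihk (i + 1) acc (by omega) (by omega)
    · rw [PySem.List.pyRange_one_eq_nil (by omega), vPow, if_neg (by omega)]
      rfl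

-- the processed region after the row loop has reached column a of length ln
def Prow (ln a : Int) (x y : Int) : Prop :=
  y - x + 1 < ln ∨ (y - x + 1 = ln ∧ x < a)

lemma prow_mono (ln a x y : Int) (h : Prow ln a x y) : Prow ln (a + 1) x y := by
  unfold Prow at *
  omega

lemma bCell_eq (text : List Char) (d0 : List (List Int)) (left right : Int) (N : Nat)
    (hR : Rect d0 N) (hrN : right.toNat ≤ N) (h0 : 0 ≤ left) (ln a : Int)
    (hln : 2 ≤ ln) (hla : left ≤ a) (har : a + ln - 1 ≤ right)
    (t : List (List Int)) (h : TInv text d0 left right (Prow ln a) t) :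
    TInv text d0 left right (Prow ln (a + 1)) (bCell text t a (a + ln - 1) ln) := by
  set b := a + ln - 1 with hbdef
  have hab : a < b := by omega
  have hnotP : ¬ Prow ln a a b := by unfold Prow; omega
  have htab : mget t a b = mget d0 a b :=
    (h.2 a b (by omega) (by omega)).2 (fun hc => hnotP hc.2.2.2.2)
  have hProw_iff : ∀ x y, ¬ (x = a ∧ y = b) → (Prow ln a x y ↔ Prow ln (a + 1) x y) := by
    intro x y hne
    unfold Prow
    constructor
    · intro hp; omega
    · intro hp
      rcases hp with hp | ⟨hp1, hp2⟩
      · exact Or.inl hp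
      · rcases lt_or_ge x a with hx | hx
        · exact Or.inr ⟨hp1, hx⟩
        · exact Or.inl (by omega)
  rw [bCell]
  by_cases hg : mget t a b ≠ -1
  · rw [if_pos hg]
    refine ⟨h.1, fun x y hx hy => ⟨fun hc => ?_, fun hc => ?_⟩⟩
    · have hne : ¬ (x = a ∧ y = b) := by
        rintro ⟨rfl, rfl⟩
        rw [htab] at hg
        exact hg hc.1
      exact (h.2 x y hx hy).1
        ⟨hc.1, hc.2.1, hc.2.2.1, hc.2.2.2.1, (hProw_iff x y hne).2 hc.2.2.2.2⟩
    · exact (h.2 x y hx hy).2 (fun hcP => hc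
        ⟨hcP.1, hcP.2.1, hcP.2.2.1, hcP.2.2.2.1, prow_mono ln a x y hcP.2.2.2.2⟩)
  · rw [if_neg hg]
    dsimp only
    have hd0 : mget d0 a b = -1 := by rw [← htab]; omega
    have hP : ∀ x y, left ≤ x → x < y → y ≤ right → y - x + 1 ≤ b - a → Prow ln a x y := by
      intro x y _ _ _ hle
      exact Or.inl (by omega)
    have e1 : (PySem.List.pyRange a b 1).foldl
        (fun acc i => min acc (bLook t a i + bLook t (i + 1) b)) ln
        = vSep text d0 a b a ln :=
      bSep_fold text d0 left right (Prow ln a) t h a b (by omega) hla (by omega) hP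
        (b - a).toNat a ln (by omega) le_rfl
    have e2 : (PySem.List.pyRange 1 ln 1).foldl
        (fun acc i => if PySem.Int.mod ln i == 0 && bPow text a i ln
          then min acc (bLook t a (a + i - 1)) else acc) (vSep text d0 a b a ln)
        = vPow text d0 a b 1 (vSep text d0 a b a ln) :=
      bPow_fold text d0 left right (Prow ln a) t h a b ln (by omega) hla (by omega)
        (by omega) hP (ln - 1).toNat 1 (vSep text d0 a b a ln) (by omega) le_rfl
    have hvgo : vGo text d0 a b = vPow text d0 a b 1 (vSep text d0 a b a (b - a + 1)) := by
      rw [vGo, if_neg (by rw [hd0]; simp), if_neg (by omega)]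
    have hsep : vSep text d0 a b a ln = vSep text d0 a b a (b - a + 1) := by
      congr 1; omega
    rw [e1, e2]
    have hval : vPow text d0 a b 1 (vSep text d0 a b a ln) = vGo text d0 a b := by
      rw [hsep, hvgo]
    have hN : N < d0.length := hR.1
    have hbN : b.toNat ≤ N := by omega
    have hlen2 : a.toNat < t.length := by have := h.1.1; omega
    have hrow : b.toNat < ((t)[a.toNat]?.getD []).length := by
      rw [h.1.2 a.toNat]
      have hlen : a.toNat < d0.length := by omega
      rw [List.getElem?_eq_getElem hlen]
      exact Nat.lt_of_le_of_lt hbN (hR.2 _ (List.getElem_mem hlen))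
    have hget : mget (mset t a b (vPow text d0 a b 1 (vSep text d0 a b a ln))) a b
        = vGo text d0 a b := by
      rw [mget_mset_self t a b _ (by omega) (by omega) hlen2 hrow, hval]
    refine ⟨shape_mset d0 t a b _ h.1, fun x y hx hy => ?_⟩
    by_cases hxy : x = a ∧ y = b
    · obtain ⟨rfl, rfl⟩ := hxy
      refine ⟨fun _ => hget, fun hc => absurd ?_ hc⟩
      exact ⟨hd0, hla, hab, by omega, Or.inr ⟨by omega, by omega⟩⟩
    · rw [mget_mset_ne t a b _ x y (by omega) (by omega) hx hy (by tauto)]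
      refine ⟨fun hc => ?_, fun hc => ?_⟩
      · exact (h.2 x y hx hy).1
          ⟨hc.1, hc.2.1, hc.2.2.1, hc.2.2.2.1, (hProw_iff x y hxy).2 hc.2.2.2.2⟩
      · exact (h.2 x y hx hy).2 (fun hcP => hc
          ⟨hcP.1, hcP.2.1, hcP.2.2.1, hcP.2.2.2.1, prow_mono ln a x y hcP.2.2.2.2⟩)

lemma bRow_fold (text : List Char) (d0 : List (List Int)) (left right : Int) (N : Nat)
    (hR : Rect d0 N) (hrN : right.toNat ≤ N) (h0 : 0 ≤ left) (ln : Int) (hln : 2 ≤ ln) :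
    ∀ k (a0 : Int) (t : List (List Int)), (right - ln + 2 - a0).toNat ≤ k → left ≤ a0 →
      TInv text d0 left right (Prow ln a0) t →
      TInv text d0 left right (fun x y => y - x + 1 < ln + 1)
        ((PySem.List.pyRange a0 (right - ln + 2) 1).foldl
          (fun t a => bCell text t a (a + ln - 1) ln) t) := by
  intro k
  induction k with
  | zero =>
    intro a0 t hk ha0 h
    rw [PySem.List.pyRange_one_eq_nil (by omega)]
    refine TInv_congr text d0 left right _ _ t h ?_
    intro x y _ _ hxy hyr
    unfold Prow
    omega
  | succ k ihk =>
    intro a0 t hk ha0 h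
    by_cases hlt : a0 < right - ln + 2
    · rw [PySem.List.pyRange_one_cons hlt, List.foldl_cons]
      exact ihk (a0 + 1) (bCell text t a0 (a0 + ln - 1) ln) (by omega) (by omega)
        (bCell_eq text d0 left right N hR hrN h0 ln a0 hln ha0 (by omega) t h)
    · rw [PySem.List.pyRange_one_eq_nil (by omega)]
      refine TInv_congr text d0 left right _ _ t h ?_
      intro x y _ _ hxy hyr
      unfold Prow
      omega

lemma bLen_fold (text : List Char) (d0 : List (List Int)) (left right : Int) (N : Nat)
    (hR : Rect d0 N) (hrN : right.toNat ≤ N) (h0 : 0 ≤ left) :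
    ∀ k (ln0 : Int) (t : List (List Int)), (right - left + 2 - ln0).toNat ≤ k → 2 ≤ ln0 →
      TInv text d0 left right (fun x y => y - x + 1 < ln0) t →
      TInv text d0 left right (fun x y => y - x + 1 < right - left + 2)
        ((PySem.List.pyRange ln0 (right - left + 2) 1).foldl
          (fun t ln => (PySem.List.pyRange left (right - ln + 2) 1).foldl
            (fun t a => bCell text t a (a + ln - 1) ln) t) t) := by
  intro k
  induction k with
  | zero =>
    intro ln0 t hk hln0 h
    rw [PySem.List.pyRange_one_eq_nil (by omega)]
    refine TInv_congr text d0 left right _ _ t h ?_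
    intro x y _ hlx hxy hyr
    omega
  | succ k ihk =>
    intro ln0 t hk hln0 h
    by_cases hlt : ln0 < right - left + 2
    · rw [PySem.List.pyRange_one_cons hlt, List.foldl_cons]
      refine ihk (ln0 + 1) _ (by omega) (by omega) ?_
      apply bRow_fold text d0 left right N hR hrN h0 ln0 hln0
        (right - ln0 + 2 - left).toNat left t (by omega) le_rfl
      refine TInv_congr text d0 left right _ _ t h ?_
      intro x y _ hlx hxy hyr
      unfold Prow
      omega
    · rw [PySem.List.pyRange_one_eq_nil (by omega)]
      refine TInv_congr text d0 left right _ _ t h ?_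
      intro x y _ hlx hxy hyr
      omega

lemma cdp_alt_eq (text : String) (dp : List (List Int)) (left right : Int)
    (hl : 0 ≤ left) (hlr : left ≤ right) (hd : right.toNat < dp.length)
    (hrow : ∀ row ∈ dp, right.toNat < row.length) :
    cdp_alt text dp left right = vGo text.toList dp left right := by
  have hR : Rect dp right.toNat := ⟨hd, hrow⟩
  rw [cdp_alt]
  by_cases hg : mget dp left right ≠ -1
  · rw [if_pos hg, vGo, if_pos hg]
  · rw [if_neg hg]
    have hd0 : mget dp left right = -1 := by omega
    by_cases heq : left = right
    · rw [if_pos heq, vGo, if_neg (by rw [hd0]; simp), if_pos heq]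
    · rw [if_neg heq]
      dsimp only
      have hinit : TInv text.toList dp left right (fun x y => y - x + 1 < 2) dp := by
        refine ⟨shape_refl dp, fun x y hx hy => ⟨fun hc => absurd hc (by omega), fun _ => rfl⟩⟩
      have hfin := bLen_fold text.toList dp left right right.toNat hR le_rfl hl
        (right - left).toNat 2 dp (by omega) le_rfl hinit
      rw [(hfin.2 left right hl (by omega)).1 ⟨hd0, le_rfl, by omega, le_rfl, by omega⟩]

-- ===== VERDICT (by name: the statement is the Claim_ definition above) =====
theorem cdp_spec : Claim_equal_cdp := by
  intro text dp left right hDom hPre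
  unfold Spec_cdp
  obtain ⟨f, hf⟩ : ∃ f, ((right - left).toNat + 1) * ((right - left).toNat + 1) = f + 1 :=
    ⟨((right - left).toNat + 1) * ((right - left).toNat + 1) - 1,
      by have := Nat.mul_pos (show 0 < (right - left).toNat + 1 by omega)
           (show 0 < (right - left).toNat + 1 by omega); omega⟩
  rcases hPre with ⟨hs, hv⟩ | ⟨heq, hsome⟩ | ⟨hl, hlr, htext, hd, hrow⟩
  · have hm : mget dp left right ≠ -1 := hv
    rw [cdp, hf, cdpGo, if_pos hm, cdp_alt, if_pos hm]
  · by_cases hm : mget dp left right ≠ -1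
    · rw [cdp, hf, cdpGo, if_pos hm, cdp_alt, if_pos hm]
    · rw [cdp, hf, cdpGo, if_neg hm, if_pos heq, cdp_alt, if_neg hm, if_pos heq]
  · rw [cdp_alt_eq text dp left right hl hlr hd hrow]
    rw [cdp]
    exact (cdpGo_eq text.toList dp right.toNat ⟨hd, hrow⟩ (right - left).toNat left right
    (((right - left).toNat + 1) * ((right - left).toNat + 1)) dp
    (by omega) le_rfl hl hlr le_rfl (shape_refl dp) (cells_refl text.toList dp)).1
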